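-- pv_equiv track=rewrite | github.com/leogzz0/algorithms-python | progra-compe/vova/mainnn.py | min_heaters
-- ===== SOURCE A (Python) =====
-- def min_heaters(n, r, house):
--     num_heaters = 0
--     cur_pos = 0
--
--     while cur_pos < n:
--         max_pos = -1
--         for i in range(cur_pos - r + 1, cur_pos + r):
--             if i >= 0 and i < n and house[i] == 1:
--                 max_pos = i
--         if max_pos == -1:
--             return -1
--         cur_pos = max_pos + r
--         num_heaters += 1
--
--     return num_heaters
-- ===== SOURCE B (Python) =====
-- def min_heaters(n, r, house):
--     # Precompute last[i] = rightmost heater index <= i (or -1), then each greedy jump is a single lookup.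
--     last = []
--     m = -1
--     for i in range(n):
--         if house[i] == 1:
--             m = i
--         last.append(m)
--     count = 0
--     pos = 0
--     while pos < n:
--         u = min(pos + r - 1, n - 1)
--         if u < 0:
--             return -1
--         j = last[u]
--         if j == -1 or j < pos - r + 1:
--             return -1
--         pos = j + r
--         count += 1
--     return count
-- ===== Notes on version B (the rewrite author's own statement) =====
-- stated objective: alternative
-- what changed: B precomputes a rightmost-heater-so-far array in one pass and replaces A's per-step window rescan by a single array lookup per greedy jump.
-- outside the precondition, e.g. on min_heaters(2, 1, [0]): A returns -1, B raises IndexError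
import Mathlib
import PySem

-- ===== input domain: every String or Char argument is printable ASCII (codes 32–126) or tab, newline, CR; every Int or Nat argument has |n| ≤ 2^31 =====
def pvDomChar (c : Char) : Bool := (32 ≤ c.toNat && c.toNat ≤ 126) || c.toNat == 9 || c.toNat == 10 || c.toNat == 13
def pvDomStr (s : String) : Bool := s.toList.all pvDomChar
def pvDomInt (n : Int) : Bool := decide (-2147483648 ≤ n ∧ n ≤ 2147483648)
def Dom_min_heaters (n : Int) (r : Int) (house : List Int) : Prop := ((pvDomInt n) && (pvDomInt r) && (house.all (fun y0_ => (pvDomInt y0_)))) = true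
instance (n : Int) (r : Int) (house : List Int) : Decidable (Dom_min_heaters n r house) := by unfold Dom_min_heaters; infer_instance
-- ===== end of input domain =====

-- B precomputes a rightmost-heater-so-far array once and replaces A's per-step window rescan by a
-- single array lookup (an alternative algorithm; equivalence is proved on Pre_: n ≤ len(house)).

-- ===== PORT A =====
-- inner 'for i in range(cur-r+1, cur+r)' scan of A; house[i] is guarded by 0 ≤ i < n, and under
-- Pre_ (n ≤ len house) that index is in range, so the total pyGetD is exact.
def mhScan (n r : Int) (house : List Int) (cur : Int) : Int :=
  (PySem.List.pyRange (cur - r + 1) (cur + r) 1).foldl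
    (fun mp i => if 0 ≤ i ∧ i < n ∧ PySem.List.pyGetD house i 0 = 1 then i else mp) (-1)

-- a fold that keeps the last element satisfying p either returns its init or an element of the list
theorem mhFold_init_or_mem (p : Int → Prop) [DecidablePred p] (l : List Int) (init : Int) :
    l.foldl (fun mp i => if p i then i else mp) init = init ∨
      l.foldl (fun mp i => if p i then i else mp) init ∈ l := by
  induction l generalizing init with
  | nil => exact Or.inl rfl
  | cons a l ih =>
    rcases ih (if p a then a else init) with h | h
    · rw [List.foldl_cons, h]
      by_cases hp : p a
      · exact Or.inr (by simp [hp])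
      · simp [hp]
    · exact Or.inr (List.mem_cons_of_mem _ h)

-- the scan result is -1 or lies in the scanned window (used for termination of the while loop)
theorem mhScan_lb (n r : Int) (house : List Int) (cur : Int) :
    mhScan n r house cur = -1 ∨ cur - r + 1 ≤ mhScan n r house cur := by
  rcases mhFold_init_or_mem (fun i => 0 ≤ i ∧ i < n ∧ PySem.List.pyGetD house i 0 = 1)
      (PySem.List.pyRange (cur - r + 1) (cur + r) 1) (-1) with h | h
  · exact Or.inl h
  · exact Or.inr ((PySem.List.mem_pyRange_one.mp h).1)

-- the 'while cur_pos < n' loop of A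
def mhLoop (n r : Int) (house : List Int) (cur num : Int) : Int :=
  if h : cur < n then
    if hm : mhScan n r house cur = -1 then -1
    else mhLoop n r house (mhScan n r house cur + r) (num + 1)
  else num
termination_by (n - cur).toNat
decreasing_by
  rcases mhScan_lb n r house cur with h1 | h1
  · exact absurd h1 hm
  · omega

def min_heaters (n : Int) (r : Int) (house : List Int) : Int :=
  mhLoop n r house 0 0

-- ===== PORT B =====
-- 'last = []; m = -1; for i in range(n): if house[i] == 1: m = i; last.append(m)'
def mhBuildLast (n : Int) (house : List Int) : List Int × Int :=
  (PySem.List.pyRange 0 n 1).foldl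
    (fun acc i =>
      if PySem.List.pyGetD house i 0 = 1 then (acc.1 ++ [i], i) else (acc.1 ++ [acc.2], acc.2))
    (([] : List Int), -1)

-- 'while pos < n' loop of B; last[u] with 0 ≤ u < len(last) ported as total pyGetD
def mhAltLoop (n r : Int) (last : List Int) (pos count : Int) : Int :=
  if h : pos < n then
    if min (pos + r - 1) (n - 1) < 0 then -1
    else
      if hj : PySem.List.pyGetD last (min (pos + r - 1) (n - 1)) 0 = -1 ∨
              PySem.List.pyGetD last (min (pos + r - 1) (n - 1)) 0 < pos - r + 1 then -1
      else mhAltLoop n r last (PySem.List.pyGetD last (min (pos + r - 1) (n - 1)) 0 + r) (count + 1)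
  else count
termination_by (n - pos).toNat
decreasing_by
  push_neg at hj
  omega

def min_heaters_alt (n : Int) (r : Int) (house : List Int) : Int :=
  mhAltLoop n r (mhBuildLast n house).1 0 0

-- ===== PRECONDITION & SPEC =====
-- Pre_ excludes n > len(house): there A indexes past the end of house (IndexError) unless its scan
-- happens to stop earlier, and B's precomputation pass raises IndexError.
def Pre_min_heaters (n : Int) (r : Int) (house : List Int) : Prop := n ≤ (house.length : Int)
instance (n : Int) (r : Int) (house : List Int) : Decidable (Pre_min_heaters n r house) := by
  unfold Pre_min_heaters; infer_instance

def pvWitness_min_heaters : Int × Int × List Int := (3, 2, [1, 0, 0])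

def Spec_min_heaters (n : Int) (r : Int) (house : List Int) (out : Int) : Prop := out = min_heaters_alt n r house
instance (n : Int) (r : Int) (house : List Int) (out : Int) : Decidable (Spec_min_heaters n r house out) := by unfold Spec_min_heaters; infer_instance

-- ===== CLAIM (what is proved, stated in full; the proofs are below) =====
def Claim_equal_min_heaters : Prop := ∀ (n : Int) (r : Int) (house : List Int), Dom_min_heaters n r house → Pre_min_heaters n r house → Spec_min_heaters n r house (min_heaters n r house)

-- ===== LEMMAS AND PROOFS =====

-- rightmost i < k with house[i] = 1 (or -1): the value B's array last stores at index k-1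
def mhBest (house : List Int) : Nat → Int
  | 0 => -1
  | k + 1 => if PySem.List.pyGetD house (k : Int) 0 = 1 then (k : Int) else mhBest house k

theorem mhBest_le (house : List Int) (k : Nat) : mhBest house k ≤ (k : Int) - 1 := by
  induction k with
  | zero => simp [mhBest]
  | succ k ih =>
    simp only [mhBest]
    split_ifs with h
    · push_cast; omega
    · push_cast; omega

theorem mhBest_heater (house : List Int) (k : Nat) :
    mhBest house k = -1 ∨ (0 ≤ mhBest house k ∧ PySem.List.pyGetD house (mhBest house k) 0 = 1) := by
  induction k with
  | zero => exact Or.inl rfl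
  | succ k ih =>
    simp only [mhBest]
    split_ifs with h
    · exact Or.inr ⟨by positivity, h⟩
    · exact ih

theorem mhBest_max (house : List Int) (k : Nat) (i : Int) (h0 : 0 ≤ i) (h1 : i < (k : Int))
    (hc : PySem.List.pyGetD house i 0 = 1) : i ≤ mhBest house k := by
  induction k with
  | zero => omega
  | succ k ih =>
    simp only [mhBest]
    by_cases hik : i = (k : Int)
    · simp [← hik, hc]
    · have hlt : i < (k : Int) := by push_cast at h1 ⊢; omega
      have := ih hlt
      split_ifs with h
      · omega
      · exact this

-- a fold keeping the last element satisfying p leaves its init alone when nothing satisfies p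
theorem mhFold_none (p : Int → Prop) [DecidablePred p] (l : List Int) (init : Int)
    (h : ∀ i ∈ l, ¬ p i) :
    l.foldl (fun mp i => if p i then i else mp) init = init := by
  induction l generalizing init with
  | nil => rfl
  | cons a l ih =>
    rw [List.foldl_cons, if_neg (h a (List.mem_cons_self))]
    exact ih _ (fun i hi => h i (List.mem_cons_of_mem _ hi))

-- when some element satisfies p the fold forgets its init
theorem mhFold_const (p : Int → Prop) [DecidablePred p] (l : List Int)
    (h : ∃ i ∈ l, p i) (v w : Int) :
    l.foldl (fun mp i => if p i then i else mp) v =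
      l.foldl (fun mp i => if p i then i else mp) w := by
  induction l generalizing v w with
  | nil => simp at h
  | cons a l ih =>
    by_cases hp : p a
    · simp [hp]
    · obtain ⟨i, hi, hpi⟩ := h
      rcases List.mem_cons.mp hi with rfl | hi
      · exact absurd hpi hp
      · simp only [List.foldl_cons, if_neg hp]
        exact ih ⟨i, hi, hpi⟩ _ _

-- mhBest is the fold of the heater test over range(k)
theorem mhBest_eq_fold (house : List Int) (k : Nat) :
    (PySem.List.pyRange 0 (k : Int) 1).foldl
      (fun mp i => if PySem.List.pyGetD house i 0 = 1 then i else mp) (-1) = mhBest house k := by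
  induction k with
  | zero => simp [PySem.List.pyRange_one_eq_nil, mhBest]
  | succ k ih =>
    have hk : ((k : Int) + 1) = ((k + 1 : Nat) : Int) := by push_cast; ring
    rw [← hk, PySem.List.pyRange_one_succ_right (by positivity), List.foldl_append, ih]
    simp [mhBest]

-- characterization of A's inner scan against mhBest for r ≥ 1
theorem mhScan_char (n r pos : Int) (house : List Int) (h0 : 0 ≤ pos) (h1 : pos < n) (hr : 1 ≤ r) :
    (mhScan n r house pos = -1 ∧
       (mhBest house ((min (pos + r - 1) (n - 1)).toNat + 1) = -1 ∨
        mhBest house ((min (pos + r - 1) (n - 1)).toNat + 1) < pos - r + 1)) ∨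
    (mhScan n r house pos = mhBest house ((min (pos + r - 1) (n - 1)).toNat + 1) ∧
       pos - r + 1 ≤ mhBest house ((min (pos + r - 1) (n - 1)).toNat + 1) ∧
       0 ≤ mhBest house ((min (pos + r - 1) (n - 1)).toNat + 1)) := by
  set u := min (pos + r - 1) (n - 1) with hu
  set l' := max (pos - r + 1) 0 with hl'
  have hal : pos - r + 1 ≤ l' := le_max_left _ _
  have hl0 : 0 ≤ l' := le_max_right _ _
  have hlu : l' ≤ u + 1 := by omega
  have hub : u + 1 ≤ pos + r := by omega
  have hu0 : 0 ≤ u := by omega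
  have hkn : (((u.toNat + 1 : Nat)) : Int) = u + 1 := by push_cast; omega
  -- split A's scanned range into the clipped-away prefix, the real window, the clipped-away suffix
  have hsplit : PySem.List.pyRange (pos - r + 1) (pos + r) 1 =
      (PySem.List.pyRange (pos - r + 1) l' 1 ++ PySem.List.pyRange l' (u + 1) 1) ++
        PySem.List.pyRange (u + 1) (pos + r) 1 := by
    rw [← PySem.List.pyRange_one_append (pos - r + 1) l' (u + 1) hal hlu,
        ← PySem.List.pyRange_one_append (pos - r + 1) (u + 1) (pos + r) (by omega) hub]
  have hmid : mhScan n r house pos =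
      (PySem.List.pyRange l' (u + 1) 1).foldl
        (fun mp i => if PySem.List.pyGetD house i 0 = 1 then i else mp) (-1) := by
    rw [mhScan, hsplit, List.foldl_append, List.foldl_append]
    rw [mhFold_none (fun i => 0 ≤ i ∧ i < n ∧ PySem.List.pyGetD house i 0 = 1)
      (PySem.List.pyRange (pos - r + 1) l' 1) (-1) (fun i hi => by
        have := PySem.List.mem_pyRange_one.mp hi
        intro hC
        omega)]
    rw [mhFold_none (fun i => 0 ≤ i ∧ i < n ∧ PySem.List.pyGetD house i 0 = 1)
      (PySem.List.pyRange (u + 1) (pos + r) 1) _ (fun i hi => by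
        have := PySem.List.mem_pyRange_one.mp hi
        intro hC
        omega)]
    exact PySem.List.foldl_congr_mem (PySem.List.pyRange l' (u + 1) 1)
      (fun mp i => if 0 ≤ i ∧ i < n ∧ PySem.List.pyGetD house i 0 = 1 then i else mp)
      (fun mp i => if PySem.List.pyGetD house i 0 = 1 then i else mp) (-1)
      (fun acc x hx => by
        have hxm := PySem.List.mem_pyRange_one.mp hx
        dsimp only
        by_cases hc : PySem.List.pyGetD house x 0 = 1
        · rw [if_pos ⟨by omega, by omega, hc⟩, if_pos hc]
        · rw [if_neg (by tauto), if_neg hc])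
  by_cases hex : ∃ i ∈ PySem.List.pyRange l' (u + 1) 1, PySem.List.pyGetD house i 0 = 1
  · -- a heater lies in the window: A's scan finds the rightmost one, which is last[u]
    right
    have hfull : mhScan n r house pos = mhBest house (u.toNat + 1) := by
      rw [hmid,
        mhFold_const _ _ hex (-1)
          ((PySem.List.pyRange 0 l' 1).foldl
            (fun mp i => if PySem.List.pyGetD house i 0 = 1 then i else mp) (-1)),
        ← List.foldl_append, ← PySem.List.pyRange_one_append 0 l' (u + 1) hl0 hlu, ← hkn,
        mhBest_eq_fold]
    obtain ⟨i, hi, hci⟩ := hex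
    have hm := PySem.List.mem_pyRange_one.mp hi
    have hmax := mhBest_max house (u.toNat + 1) i (by omega) (by omega) hci
    exact ⟨hfull, by omega, by omega⟩
  · -- no heater in the window: A's scan gives -1 and B's check rejects last[u]
    left
    push_neg at hex
    refine ⟨by rw [hmid]; exact mhFold_none _ _ _ hex, ?_⟩
    by_contra hcon
    push_neg at hcon
    obtain ⟨hne, hge⟩ := hcon
    rcases mhBest_heater house (u.toNat + 1) with h | ⟨hge0, hc⟩
    · exact hne h
    · have hle := mhBest_le house (u.toNat + 1)
      exact hex _ (PySem.List.mem_pyRange_one.mpr ⟨by omega, by omega⟩) hc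

-- for r ≤ 0 A's scanned range is empty
theorem mhScan_neg (n r pos : Int) (house : List Int) (hr : r ≤ 0) :
    mhScan n r house pos = -1 := by
  rw [mhScan, PySem.List.pyRange_one_eq_nil (by omega)]
  rfl

-- B's precomputed array lists mhBest at every index
theorem mhBuildLast_eq (house : List Int) (k : Nat) :
    mhBuildLast (k : Int) house =
      ((PySem.List.pyRange 0 (k : Int) 1).map (fun i => mhBest house (i.toNat + 1)),
       mhBest house k) := by
  induction k with
  | zero => simp [mhBuildLast, PySem.List.pyRange_one_eq_nil, mhBest]
  | succ k ih =>
    have hk : ((k : Int) + 1) = ((k + 1 : Nat) : Int) := by push_cast; ring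
    rw [mhBuildLast, ← hk, PySem.List.pyRange_one_succ_right (by positivity), List.foldl_append]
    rw [show (PySem.List.pyRange 0 (k:Int) 1).foldl
        (fun acc i => if PySem.List.pyGetD house i 0 = 1 then (acc.1 ++ [i], i)
          else (acc.1 ++ [acc.2], acc.2)) (([] : List Int), -1) = mhBuildLast (k : Int) house from rfl,
      ih]
    have hbest : mhBest house (k + 1) =
        if PySem.List.pyGetD house (k : Int) 0 = 1 then (k : Int) else mhBest house k := rfl
    simp only [List.foldl_cons, List.foldl_nil, List.map_append, List.map_cons, List.map_nil,
      Int.toNat_natCast]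
    by_cases h : PySem.List.pyGetD house (k : Int) 0 = 1
    · rw [if_pos h, hbest, if_pos h]
    · rw [if_neg h, hbest, if_neg h]

-- reading last[u] for 0 ≤ u < n
theorem mhLast_get (n : Int) (house : List Int) (u : Int) (h0 : 0 ≤ u) (h1 : u < n) :
    PySem.List.pyGetD (mhBuildLast n house).1 u 0 = mhBest house (u.toNat + 1) := by
  have hn : n = ((n.toNat : Nat) : Int) := by omega
  rw [hn, mhBuildLast_eq]
  exact PySem.List.pyGetD_map_pyRange_of_nonneg _ _ _ _ h0 (by omega)

-- the two loops agree step for step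
theorem mhLoop_eq (n r : Int) (house : List Int) :
    ∀ (K : Nat) (pos count : Int), (n - pos).toNat ≤ K → 0 ≤ pos →
      mhLoop n r house pos count = mhAltLoop n r (mhBuildLast n house).1 pos count := by
  intro K
  induction K with
  | zero =>
    intro pos count hK hpos
    have hge : ¬ pos < n := by omega
    rw [mhLoop, mhAltLoop, dif_neg hge, dif_neg hge]
  | succ K ih =>
    intro pos count hK hpos
    by_cases hc : pos < n
    · rw [mhLoop, mhAltLoop, dif_pos hc, dif_pos hc]
      by_cases hr : 1 ≤ r
      · have hu0 : ¬ min (pos + r - 1) (n - 1) < 0 := by omega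
        rw [if_neg hu0, mhLast_get n house _ (by omega) (by omega)]
        rcases mhScan_char n r pos house hpos hc hr with ⟨hs, hcond⟩ | ⟨hs, hlb, hge0⟩
        · rw [dif_pos hs, dif_pos hcond]
        · have hne : ¬ mhScan n r house pos = -1 := by omega
          have hcond : ¬ (mhBest house ((min (pos + r - 1) (n - 1)).toNat + 1) = -1 ∨
              mhBest house ((min (pos + r - 1) (n - 1)).toNat + 1) < pos - r + 1) := by omega
          rw [dif_neg hne, dif_neg hcond, hs]
          exact ih _ _ (by omega) (by omega)
      · -- r ≤ 0: A's window is empty; B's last[u] (if u ≥ 0) lies left of the window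
        push_neg at hr
        have hs := mhScan_neg n r pos house (by omega)
        rw [dif_pos hs]
        by_cases hu : min (pos + r - 1) (n - 1) < 0
        · rw [if_pos hu]
        · rw [if_neg hu, mhLast_get n house _ (by omega) (by omega)]
          have hle := mhBest_le house ((min (pos + r - 1) (n - 1)).toNat + 1)
          rw [dif_pos (Or.inr (by omega))]
    · rw [mhLoop, mhAltLoop, dif_neg hc, dif_neg hc]

-- ===== VERDICT (by name: the statement is the Claim_ definition above) =====
theorem min_heaters_spec : Claim_equal_min_heaters := by
  intro n r house _ _
  unfold Spec_min_heaters min_heaters min_heaters_alt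
  exact mhLoop_eq n r house (n - 0).toNat 0 0 (by omega) (by omega)
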